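-- pv_equiv track=rewrite | github.com/gnoobs75/Okyaku | backend/app/services/ai_content_service.py | _parse_variations
-- ===== SOURCE A (Python) =====
-- def _parse_variations(content: str, expected_count: int) -> list[str]:
--     """Parse variations from the response."""
--     variations = []
--     lines = content.split("\n")
--     current_variation = []
--     in_variation = False
--
--     for line in lines:
--         if line.strip().upper().startswith("VARIATION"):
--             if current_variation:
--                 variations.append("\n".join(current_variation).strip())
--             current_variation = []
--             in_variation = True
--         elif in_variation and line.strip():
--             current_variation.append(line)
--
--     if current_variation:
--         variations.append("\n".join(current_variation).strip())
--
--     return variations[:expected_count]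
-- ===== SOURCE B (Python) =====
-- def _parse_variations(content: str, expected_count: int) -> list[str]:
--     lines = content.split("\n")
--     # phase 1: split the lines into raw blocks at header lines; blocks[0] is the preamble
--     blocks = [[]]
--     for line in lines:
--         if line.strip().upper().startswith("VARIATION"):
--             blocks.append([])
--         else:
--             blocks[-1].append(line)
--     # phase 2: map each block after the preamble to its cleaned text, dropping empty blocks
--     results = []
--     for block in blocks[1:]:
--         kept = [ln for ln in block if ln.strip()]
--         if kept:
--             results.append("\n".join(kept).strip())
--     return results[:expected_count]
-- ===== Notes on version B (the rewrite author's own statement) =====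
-- stated objective: alternative
-- what changed: A's single pass with a current-block accumulator and an in_variation flag is replaced by a two-phase decomposition: first split the lines into raw blocks at the VARIATION header lines, then map each post-preamble block to its cleaned text (filter blanks, join, strip), dropping empty blocks.
import Mathlib
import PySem

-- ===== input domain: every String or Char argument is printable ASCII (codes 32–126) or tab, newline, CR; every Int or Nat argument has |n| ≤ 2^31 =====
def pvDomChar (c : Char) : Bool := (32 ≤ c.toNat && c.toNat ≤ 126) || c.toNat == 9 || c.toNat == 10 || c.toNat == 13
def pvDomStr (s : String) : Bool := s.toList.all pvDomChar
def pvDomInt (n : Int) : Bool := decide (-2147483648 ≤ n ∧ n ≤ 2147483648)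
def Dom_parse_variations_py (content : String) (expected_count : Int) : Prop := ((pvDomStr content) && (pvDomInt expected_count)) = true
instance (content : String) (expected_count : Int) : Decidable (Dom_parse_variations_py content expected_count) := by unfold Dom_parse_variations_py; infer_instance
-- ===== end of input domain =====

-- B replaces A's single-pass flag+accumulator parse by a two-phase decomposition (split the
-- lines into raw blocks at the header lines, then map each post-preamble block to its cleaned
-- text); same cost, chosen for clarity ("alternative"). Return values proved equal; no mutation.

-- ===== PORT A =====
def parse_variations_py (content : String) (expected_count : Int) : List String :=
  -- lines = content.split("\n")  (sep is the nonempty literal "\n", so split? is always `some`)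
  let lines := (PySem.Str.split? content "\n").getD []
  let st := lines.foldl
    (fun (st : List String × List String × Bool) line =>
      if PySem.Str.startswith (PySem.Str.upper (PySem.Str.strip line)) "VARIATION" then
        (if !st.2.1.isEmpty then
            st.1 ++ [PySem.Str.strip (PySem.Str.join "\n" st.2.1)]
          else st.1, [], true)
      else if st.2.2 && !(PySem.Str.strip line == "") then
        (st.1, st.2.1 ++ [line], st.2.2)
      else st)
    ([], [], false)
  let variations :=
    if !st.2.1.isEmpty then st.1 ++ [PySem.Str.strip (PySem.Str.join "\n" st.2.1)] else st.1
  PySem.List.slice variations none (some expected_count)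

-- ===== PORT B =====
-- blocks[-1].append(line); exact here because B keeps blocks nonempty throughout
def pvAppendLast (bs : List (List String)) (line : String) : List (List String) :=
  bs.dropLast ++ [bs.getLastD [] ++ [line]]

def parse_variations_py_alt (content : String) (expected_count : Int) : List String :=
  let lines := (PySem.Str.split? content "\n").getD []
  -- phase 1: split the lines into raw blocks at header lines; blocks[0] is the preamble
  let blocks := lines.foldl
    (fun bs line =>
      if PySem.Str.startswith (PySem.Str.upper (PySem.Str.strip line)) "VARIATION" then
        bs ++ [[]]
      else pvAppendLast bs line)
    [[]]
  -- phase 2: map each block after the preamble to its cleaned text, dropping empty blocks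
  let results := (blocks.drop 1).foldl
    (fun res block =>
      let kept := block.filter (fun ln => !(PySem.Str.strip ln == ""))
      if kept.isEmpty then res else res ++ [PySem.Str.strip (PySem.Str.join "\n" kept)])
    []
  PySem.List.slice results none (some expected_count)

-- ===== PRECONDITION & SPEC =====
def Spec_parse_variations_py (content : String) (expected_count : Int) (out : List String) : Prop := out = parse_variations_py_alt content expected_count
instance (content : String) (expected_count : Int) (out : List String) : Decidable (Spec_parse_variations_py content expected_count out) := by unfold Spec_parse_variations_py; infer_instance

-- ===== CLAIM (what is proved, stated in full; the proofs are below) =====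
def Claim_equal_parse_variations_py : Prop := ∀ (content : String) (expected_count : Int), Dom_parse_variations_py content expected_count → Spec_parse_variations_py content expected_count (parse_variations_py content expected_count)

-- ===== LEMMAS AND PROOFS =====

-- abbreviations for the two line predicates and the block-to-text map
def pvIsH (l : String) : Bool :=
  PySem.Str.startswith (PySem.Str.upper (PySem.Str.strip l)) "VARIATION"

def pvKeep (l : String) : Bool := !(PySem.Str.strip l == "")

def pvEmit (b : List String) : Option String :=
  if b.isEmpty then none else some (PySem.Str.strip (PySem.Str.join "\n" b))

-- raw blocks produced by B's phase 1 on the remaining lines, given the current open block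
def pvGrpR (cur : List String) : List String → List (List String)
  | [] => [cur]
  | l :: t => if pvIsH l then cur :: pvGrpR [] t else pvGrpR (cur ++ [l]) t

-- filtered blocks accumulated by A after the first header, given the current accumulator
def pvGrpF (cur : List String) : List String → List (List String)
  | [] => [cur]
  | l :: t =>
    if pvIsH l then cur :: pvGrpF [] t
    else if pvKeep l then pvGrpF (cur ++ [l]) t else pvGrpF cur t

-- B phase 1 fold invariant
theorem pvB1 (ls : List String) : ∀ (pre : List (List String)) (cur : List String),
    ls.foldl (fun bs line => if pvIsH line then bs ++ [[]] else pvAppendLast bs line)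
      (pre ++ [cur]) = pre ++ pvGrpR cur ls := by
  induction ls with
  | nil => intro pre cur; simp [pvGrpR]
  | cons l t ih =>
    intro pre cur
    simp only [List.foldl_cons, pvGrpR]
    by_cases h : pvIsH l = true
    · simp only [h, if_pos]
      have := ih (pre ++ [cur]) []
      simpa using this
    · simp only [h, if_neg, Bool.false_eq_true, not_false_iff]
      have hApp : pvAppendLast (pre ++ [cur]) l = pre ++ [cur ++ [l]] := by
        simp [pvAppendLast]
      rw [hApp, ih]

-- B's phase 2 loop body
def pvStepB (res : List String) (block : List String) : List String :=
  let kept := block.filter pvKeep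
  if kept.isEmpty then res else res ++ [PySem.Str.strip (PySem.Str.join "\n" kept)]

-- B phase 2 fold is a filterMap
theorem pvB2 (bs : List (List String)) : ∀ (res : List String),
    bs.foldl pvStepB res = res ++ bs.filterMap (fun b => pvEmit (b.filter pvKeep)) := by
  induction bs with
  | nil => intro res; simp
  | cons b t ih =>
    intro res
    rw [List.foldl_cons, List.filterMap_cons]
    by_cases h : (b.filter pvKeep).isEmpty = true
    · rw [show pvStepB res b = res from by simp only [pvStepB]; rw [if_pos h],
        show pvEmit (b.filter pvKeep) = none from by simp only [pvEmit]; rw [if_pos h], ih]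
    · rw [show pvStepB res b = res ++ [PySem.Str.strip (PySem.Str.join "\n" (b.filter pvKeep))]
          from by simp only [pvStepB]; rw [if_neg h],
        show pvEmit (b.filter pvKeep)
            = some (PySem.Str.strip (PySem.Str.join "\n" (b.filter pvKeep)))
          from by simp only [pvEmit]; rw [if_neg h], ih]
      simp

-- A's flush of the final state
def pvFlush (st : List String × List String × Bool) : List String :=
  if !st.2.1.isEmpty then st.1 ++ [PySem.Str.strip (PySem.Str.join "\n" st.2.1)] else st.1

def pvStepA (st : List String × List String × Bool) (line : String) :
    List String × List String × Bool :=
  if pvIsH line then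
    (if !st.2.1.isEmpty then st.1 ++ [PySem.Str.strip (PySem.Str.join "\n" st.2.1)] else st.1,
      [], true)
  else if st.2.2 && pvKeep line then (st.1, st.2.1 ++ [line], st.2.2)
  else st

-- A's loop after the first header
theorem pvA1 (ls : List String) : ∀ (vars cur : List String),
    pvFlush (ls.foldl pvStepA (vars, cur, true))
      = vars ++ (pvGrpF cur ls).filterMap pvEmit := by
  induction ls with
  | nil =>
    intro vars cur
    by_cases h : cur.isEmpty = true
    · have : cur = [] := List.isEmpty_iff.mp h
      subst this; simp [pvFlush, pvGrpF, pvEmit]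
    · have hne : cur ≠ [] := by simpa [List.isEmpty_iff] using h
      simp [pvFlush, pvGrpF, pvEmit, h, hne]
  | cons l t ih =>
    intro vars cur
    simp only [List.foldl_cons, pvGrpF, pvStepA]
    by_cases h : pvIsH l = true
    · simp only [h, if_pos, List.filterMap_cons]
      by_cases hc : cur.isEmpty = true
      · simp [hc, ih, pvEmit]
      · simp [hc, ih, pvEmit]
    · simp only [h, Bool.false_eq_true, if_false]
      by_cases hk : pvKeep l = true
      · simp only [hk, Bool.true_and, if_pos]
        exact ih vars (cur ++ [l])
      · simp only [hk, Bool.and_false, Bool.false_eq_true, if_false]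
        exact ih vars cur

-- A's filtered blocks are the keep-filter of B's raw blocks
theorem pvGF (ls : List String) : ∀ (cur : List String),
    pvGrpF (cur.filter pvKeep) ls = (pvGrpR cur ls).map (List.filter pvKeep) := by
  induction ls with
  | nil => intro cur; simp [pvGrpF, pvGrpR]
  | cons l t ih =>
    intro cur
    simp only [pvGrpF, pvGrpR]
    by_cases h : pvIsH l = true
    · have := ih []
      simp only [List.filter_nil] at this
      simp [h, this]
    · simp only [h, Bool.false_eq_true, if_false]
      by_cases hk : pvKeep l = true
      · rw [if_pos hk,
          show cur.filter pvKeep ++ [l] = (cur ++ [l]).filter pvKeep from by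
            simp [List.filter_append, hk]]
        exact ih (cur ++ [l])
      · rw [if_neg hk,
          show cur.filter pvKeep = (cur ++ [l]).filter pvKeep from by
            simp [List.filter_append, hk]]
        exact ih (cur ++ [l])

-- A's pre-header loop, related to B's blocks with the preamble dropped
theorem pvA0 (ls : List String) : ∀ (vars cur : List String),
    pvFlush (ls.foldl pvStepA (vars, [], false))
      = vars ++ ((pvGrpR cur ls).drop 1).filterMap (fun b => pvEmit (b.filter pvKeep)) := by
  induction ls with
  | nil => intro vars cur; simp [pvFlush, pvGrpR]
  | cons l t ih =>
    intro vars cur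
    simp only [List.foldl_cons, pvGrpR, pvStepA]
    by_cases h : pvIsH l = true
    · simp only [h, if_pos, List.isEmpty_nil, Bool.not_true, Bool.false_eq_true, if_false,
        List.drop_succ_cons, List.drop_zero]
      rw [pvA1]
      have hg := pvGF t (cur := [])
      simp only [List.filter_nil] at hg
      rw [hg, List.filterMap_map]
      rfl
    · simp only [h, Bool.false_eq_true, if_false, Bool.false_and, if_false]
      exact ih vars (cur ++ [l])

-- ===== VERDICT (by name: the statement is the Claim_ definition above) =====
theorem parse_variations_py_spec : Claim_equal_parse_variations_py := by
  intro content expected_count _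
  unfold Spec_parse_variations_py
  have key : ∀ lines : List String,
      pvFlush (lines.foldl pvStepA ([], [], false))
        = (((lines.foldl
              (fun bs line => if pvIsH line then bs ++ [[]] else pvAppendLast bs line)
              [[]]).drop 1).foldl pvStepB []) := by
    intro lines
    have hB := pvB1 lines [] []
    simp only [List.nil_append] at hB
    have hB2 := pvB2 ((pvGrpR [] lines).drop 1) []
    simp only [List.nil_append] at hB2
    have h0 := pvA0 lines (vars := []) (cur := [])
    simp only [List.nil_append] at h0
    rw [hB, hB2]
    exact h0
  show PySem.List.slice
      (pvFlush ((((PySem.Str.split? content "\n").getD []).foldl pvStepA ([], [], false))))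
      none (some expected_count)
    = PySem.List.slice
      ((((((PySem.Str.split? content "\n").getD []).foldl
            (fun bs line => if pvIsH line then bs ++ [[]] else pvAppendLast bs line)
            [[]]).drop 1).foldl pvStepB []))
      none (some expected_count)
  rw [key]
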